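-- pv_equiv track=rewrite | github.com/leeminHong1990/PaoDeKuai | kbengine/assets/scripts/common/utility.py | checkIsSerialPair
-- ===== SOURCE A (Python) =====
-- def getCard2NumDict(cards):
--     card2NumDict = {}
--     for t in cards:
--         if t not in card2NumDict:
--             card2NumDict[t] = 1
--         else:
--             card2NumDict[t] += 1
--     return card2NumDict
--
-- def checkIsSerialPair(cards):  # 连对
--     if len(cards) < 4 or len(cards) % 2 != 0:
--         return False
--     card2NumDict = getCard2NumDict(cards)
--     # 张数
--     for card in card2NumDict:
--         if card2NumDict[card] != 2:
--             return False
--     # 顺序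
--     serial = card2NumDict.keys()
--     serial = sorted(serial)
--     for i in range(len(serial) - 1):
--         if serial[i] + 1 != serial[i + 1]:
--             return False
--     return True
-- ===== SOURCE B (Python) =====
-- def checkIsSerialPair(cards):
--     n = len(cards)
--     if n < 4 or n % 2 != 0:
--         return False
--     cnt = {}
--     for t in cards:
--         cnt[t] = cnt.get(t, 0) + 1
--     if any(c != 2 for c in cnt.values()):
--         return False
--     return max(cnt) - min(cnt) == len(cnt) - 1
-- ===== Notes on version B (the rewrite author's own statement) =====
-- stated objective: alternative
-- what changed: replaces the sort of the distinct cards plus adjacent-pair scan by a constant-space arithmetic check: counts are all 2 and max - min == number of distinct cards - 1 (distinct values span an interval iff the spread equals the count minus one), removing the O(k log k) sort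
import Mathlib
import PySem

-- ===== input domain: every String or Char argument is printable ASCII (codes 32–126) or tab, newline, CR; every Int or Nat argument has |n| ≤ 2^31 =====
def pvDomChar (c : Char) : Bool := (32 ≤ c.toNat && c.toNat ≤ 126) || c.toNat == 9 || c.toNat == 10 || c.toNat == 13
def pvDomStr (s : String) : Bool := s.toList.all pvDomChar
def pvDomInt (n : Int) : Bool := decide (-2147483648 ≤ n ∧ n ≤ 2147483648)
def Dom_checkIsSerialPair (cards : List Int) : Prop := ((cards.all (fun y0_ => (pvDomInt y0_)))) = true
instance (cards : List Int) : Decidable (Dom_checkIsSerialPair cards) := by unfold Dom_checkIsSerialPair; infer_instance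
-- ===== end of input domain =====

-- B replaces A's sort of the distinct cards + adjacent-pair scan by the arithmetic
-- check max - min == #distinct - 1 on a counter dict (alternative algorithm, no sort).

-- ===== PORT A =====
-- A's getCard2NumDict: membership-branching count loop (d[t] exists in the else branch, so getD is exact there)
def getCard2NumDict (cards : List Int) : PySem.Dict Int Int :=
  cards.foldl
    (fun d t => if d.contains t = false then d.insert t 1 else d.insert t (d.getD t 0 + 1))
    PySem.Dict.empty

def checkIsSerialPair (cards : List Int) : Bool :=
  if cards.length < 4 ∨ cards.length % 2 ≠ 0 then false
  else
    let card2NumDict := getCard2NumDict cards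
    -- for card in card2NumDict: if card2NumDict[card] != 2: return False
    if ¬ (card2NumDict.keys.all (fun card => card2NumDict.getD card 0 == 2)) then false
    else
      let serial := PySem.List.sorted card2NumDict.keys (fun x => x) false
      -- for i in range(len(serial) - 1): if serial[i] + 1 != serial[i + 1]: return False
      if ¬ ((PySem.List.pyRange 0 ((serial.length : Int) - 1) 1).all
            (fun i => PySem.List.pyGetD serial i 0 + 1 == PySem.List.pyGetD serial (i + 1) 0)) then false
      else true

-- ===== PORT B =====
def checkIsSerialPair_alt (cards : List Int) : Bool :=
  let n := cards.length
  if n < 4 ∨ n % 2 ≠ 0 then false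
  else
    let cnt : PySem.Dict Int Int := cards.foldl (fun d t => d.insert t (d.getD t 0 + 1)) PySem.Dict.empty
    if cnt.values.any (fun c => c ≠ 2) then false
    else
      match PySem.List.max? cnt.keys (fun x => x), PySem.List.min? cnt.keys (fun x => x) with
      | some mx, some mn => mx - mn == (cnt.size : Int) - 1
      | _, _ => false

-- ===== PRECONDITION & SPEC =====
def Spec_checkIsSerialPair (cards : List Int) (out : Bool) : Prop := out = checkIsSerialPair_alt cards
instance (cards : List Int) (out : Bool) : Decidable (Spec_checkIsSerialPair cards out) := by unfold Spec_checkIsSerialPair; infer_instance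

-- ===== CLAIM (what is proved, stated in full; the proofs are below) =====
def Claim_equal_checkIsSerialPair : Prop := ∀ (cards : List Int), Dom_checkIsSerialPair cards → Spec_checkIsSerialPair cards (checkIsSerialPair cards)

-- ===== LEMMAS AND PROOFS =====

-- A's count loop builds the same dict as B's (hence both are PySem.Dict.counter cards)
lemma getCard2NumDict_eq_counter (cards : List Int) :
    getCard2NumDict cards = PySem.Dict.counter cards := by
  rw [← PySem.Dict.foldl_insert_getD_add_one_eq_counter]
  unfold getCard2NumDict
  congr 1
  funext d t
  by_cases h : d.contains t = false
  · rw [PySem.Dict.getD_of_not_contains _ _ h]; norm_num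
  · simp [h]

-- strictly increasing list: indexed gaps (stated with getD so omega sees uniform atoms)
lemma strict_inc_adj (s : List Int) (hp : s.Pairwise (· < ·)) (i : Nat)
    (h : i + 1 < s.length) : s.getD i 0 < s.getD (i + 1) 0 := by
  rw [List.pairwise_iff_getElem] at hp
  rw [List.getD_eq_getElem s 0 (by omega), List.getD_eq_getElem s 0 h]
  exact hp i (i + 1) (by omega) h (by omega)

lemma strict_inc_le (s : List Int) (hp : s.Pairwise (· < ·)) :
    ∀ (d i : Nat), i + d < s.length → s.getD i 0 + (d : Int) ≤ s.getD (i + d) 0 := by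
  intro d
  induction d with
  | zero => intro i h; simp
  | succ k ih =>
    intro i h
    have h1 := ih i (by omega)
    have h2 := strict_inc_adj s hp (i + k) (by omega)
    have he : i + (k + 1) = (i + k) + 1 := by omega
    rw [he]
    push_cast
    omega

lemma strict_inc_le' (s : List Int) (hp : s.Pairwise (· < ·)) (i j : Nat)
    (hj : j < s.length) (hij : i ≤ j) : s.getD i 0 + ((j : Int) - (i : Int)) ≤ s.getD j 0 := by
  have := strict_inc_le s hp (j - i) i (by omega)
  rw [show i + (j - i) = j from by omega] at this
  have hc : ((j - i : Nat) : Int) = (j : Int) - (i : Int) := by omega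
  rw [hc] at this
  exact this

lemma adjacent_iff_spread (s : List Int) (hp : s.Pairwise (· < ·)) (hne : s ≠ []) :
    ((∀ i : Nat, i + 1 < s.length → s.getD i 0 + 1 = s.getD (i + 1) 0) ↔
      s.getD (s.length - 1) 0 - s.getD 0 0 = (s.length : Int) - 1) := by
  have hlen : 1 ≤ s.length := by cases s <;> simp_all
  constructor
  · intro h
    have key : ∀ i : Nat, i < s.length → s.getD i 0 = s.getD 0 0 + (i : Int) := by
      intro i hi
      induction i with
      | zero => simp
      | succ k ih =>
        rw [← h k (by omega), ih (by omega)]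
        push_cast
        ring
    rw [key (s.length - 1) (by omega), key 0 (by omega)]
    push_cast [Nat.cast_sub hlen]
    omega
  · intro h i hi
    have h1 := strict_inc_le' s hp 0 i (by omega) (by omega)
    have h2 := strict_inc_le' s hp (i + 1) (s.length - 1) (by omega) (by omega)
    have h3 := strict_inc_adj s hp i hi
    have hc : ((s.length - 1 : Nat) : Int) = (s.length : Int) - 1 := by omega
    rw [hc] at h2
    push_cast at h1 h2 ⊢
    omega

-- every member of s sits at some index, as a getD value
lemma mem_iff_getD (s : List Int) (m : Int) (hm : m ∈ s) :
    ∃ i : Nat, i < s.length ∧ s.getD i 0 = m := by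
  obtain ⟨i, hi, he⟩ := List.getElem_of_mem hm
  exact ⟨i, hi, by rw [List.getD_eq_getElem s 0 hi]; exact he⟩

-- value of max?/min? over the keys, read off the sorted strictly-increasing rearrangement
lemma max?_eq_getLast (xs : List Int) (s : List Int) (hperm : s.Perm xs)
    (hp : s.Pairwise (· < ·)) (hne : s ≠ []) (m : Int)
    (hm : PySem.List.max? xs (fun x => x) = some m) :
    m = s.getD (s.length - 1) 0 := by
  have hlen : 1 ≤ s.length := by cases s <;> simp_all
  obtain ⟨i, hi, he⟩ := mem_iff_getD s m (hperm.mem_iff.mpr (PySem.List.max?_mem hm))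
  have h1 := strict_inc_le' s hp i (s.length - 1) (by omega) (by omega)
  have hmem : s.getD (s.length - 1) 0 ∈ s := by
    rw [List.getD_eq_getElem s 0 (by omega : s.length - 1 < s.length)]
    exact List.getElem_mem _
  have h2 : s.getD (s.length - 1) 0 ≤ m := PySem.List.max?_isMax hm _ (hperm.mem_iff.mp hmem)
  omega

lemma min?_eq_head (xs : List Int) (s : List Int) (hperm : s.Perm xs)
    (hp : s.Pairwise (· < ·)) (hne : s ≠ []) (m : Int)
    (hm : PySem.List.min? xs (fun x => x) = some m) :
    m = s.getD 0 0 := by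
  have hlen : 1 ≤ s.length := by cases s <;> simp_all
  obtain ⟨i, hi, he⟩ := mem_iff_getD s m (hperm.mem_iff.mpr (PySem.List.min?_mem hm))
  have h1 := strict_inc_le' s hp 0 i (by omega) (by omega)
  have hmem : s.getD 0 0 ∈ s := by
    rw [List.getD_eq_getElem s 0 (by omega : 0 < s.length)]
    exact List.getElem_mem _
  have h2 : m ≤ s.getD 0 0 := PySem.List.min?_isMin hm _ (hperm.mem_iff.mp hmem)
  omega

-- A's index loop over the sorted keys, as a Nat-indexed adjacency statement
lemma loop_iff_adjacent (s : List Int) :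
    ((PySem.List.pyRange 0 ((s.length : Int) - 1) 1).all
        (fun i => PySem.List.pyGetD s i 0 + 1 == PySem.List.pyGetD s (i + 1) 0)) = true ↔
      (∀ i : Nat, i + 1 < s.length → s.getD i 0 + 1 = s.getD (i + 1) 0) := by
  rw [List.all_eq_true]
  constructor
  · intro H i hi
    have hx := H (i : Int) (by rw [PySem.List.mem_pyRange_one]; omega)
    have h1 : ((i : Int) + 1) = ((i + 1 : Nat) : Int) := by push_cast; ring
    rw [h1, PySem.List.pyGetD_natCast, PySem.List.pyGetD_natCast] at hx
    exact eq_of_beq hx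
  · intro H x hx
    rw [PySem.List.mem_pyRange_one] at hx
    have hx0 : x = ((x.toNat : Nat) : Int) := by omega
    rw [hx0]
    have h1 : ((x.toNat : Int) + 1) = ((x.toNat + 1 : Nat) : Int) := by push_cast; ring
    rw [h1, PySem.List.pyGetD_natCast, PySem.List.pyGetD_natCast]
    exact beq_iff_eq.mpr (H x.toNat (by omega))

-- ===== VERDICT (by name: the statement is the Claim_ definition above) =====
theorem checkIsSerialPair_spec : Claim_equal_checkIsSerialPair := by
  intro cards _
  unfold Spec_checkIsSerialPair checkIsSerialPair checkIsSerialPair_alt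
  by_cases hg : cards.length < 4 ∨ cards.length % 2 ≠ 0
  · rw [if_pos hg, if_pos hg]
  · rw [if_neg hg, if_neg hg]
    have hfold : cards.foldl (fun d t => d.insert t (d.getD t 0 + 1)) PySem.Dict.empty =
        PySem.Dict.counter cards := PySem.Dict.foldl_insert_getD_add_one_eq_counter cards
    rw [getCard2NumDict_eq_counter, hfold]
    have hcne : cards ≠ [] := by
      intro h
      subst h
      simp at hg
    have hnd : (PySem.Dict.counter cards).keys.Nodup := PySem.Dict.nodup_keys_counter cards
    by_cases hc : ∀ k ∈ (PySem.Dict.counter cards).keys, (PySem.Dict.counter cards).getD k 0 = 2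
    · have hA : ((PySem.Dict.counter cards).keys.all
          (fun card => (PySem.Dict.counter cards).getD card 0 == 2)) = true := by
        rw [List.all_eq_true]
        intro k hk
        exact beq_iff_eq.mpr (hc k hk)
      have hB : ((PySem.Dict.counter cards).values.any (fun c => c ≠ 2)) = false := by
        rw [List.any_eq_false]
        intro c hcmem
        rw [PySem.Dict.values_eq_map_keys _ hnd 0, List.mem_map] at hcmem
        obtain ⟨k, hk, rfl⟩ := hcmem
        rw [decide_eq_true_eq]
        exact fun hne => hne (hc k hk)
      have hBc : ¬ (((PySem.Dict.counter cards).values.any (fun c => c ≠ 2)) = true) := by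
        rw [hB]
        exact Bool.false_ne_true
      rw [if_neg (not_not_intro hA)]
      rw [if_neg hBc]
      -- the sorted distinct cards
      have hperm : (PySem.List.sorted (PySem.Dict.counter cards).keys (fun x => x) false).Perm
          (PySem.Dict.counter cards).keys := PySem.List.sorted_perm _ _ _
      have hp : (PySem.List.sorted (PySem.Dict.counter cards).keys (fun x => x) false).Pairwise (· < ·) := by
        rw [PySem.Dict.keys_counter]
        exact PySem.List.sorted_ofList_pairwise_lt cards
      have hkne : (PySem.Dict.counter cards).keys ≠ [] := by
        obtain ⟨x, hx⟩ := List.exists_mem_of_ne_nil cards hcne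
        intro h
        have hxk : x ∈ (PySem.Dict.counter cards).keys := by
          rw [PySem.Dict.keys_counter, PySem.Set.mem_ofList]
          exact hx
        rw [h] at hxk
        exact absurd hxk (List.not_mem_nil)
      have hsne : (PySem.List.sorted (PySem.Dict.counter cards).keys (fun x => x) false) ≠ [] := by
        rw [Ne, PySem.List.sorted_eq_nil_iff]
        exact hkne
      cases hmx : PySem.List.max? (PySem.Dict.counter cards).keys (fun x => x) with
      | none => exact absurd ((PySem.List.max?_eq_none_iff _ _).mp hmx) hkne
      | some mx =>
        cases hmn : PySem.List.min? (PySem.Dict.counter cards).keys (fun x => x) with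
        | none => exact absurd ((PySem.List.min?_eq_none_iff _ _).mp hmn) hkne
        | some mn =>
          have hmx' := max?_eq_getLast _ _ hperm hp hsne mx hmx
          have hmn' := min?_eq_head _ _ hperm hp hsne mn hmn
          have hL : (PySem.List.sorted (PySem.Dict.counter cards).keys (fun x => x) false).length =
              (PySem.Dict.counter cards).keys.length := PySem.List.length_sorted _ _ _
          have hsize : ((PySem.Dict.counter cards).size : Int) =
              ((PySem.Dict.counter cards).keys.length : Int) := by
            simp [PySem.Dict.size, PySem.Dict.keys]
          have hspread := adjacent_iff_spread
            (PySem.List.sorted (PySem.Dict.counter cards).keys (fun x => x) false) hp hsne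
          have hlb := loop_iff_adjacent
            (PySem.List.sorted (PySem.Dict.counter cards).keys (fun x => x) false)
          by_cases hloop : ∀ i : Nat,
              i + 1 < (PySem.List.sorted (PySem.Dict.counter cards).keys (fun x => x) false).length →
              (PySem.List.sorted (PySem.Dict.counter cards).keys (fun x => x) false).getD i 0 + 1 =
              (PySem.List.sorted (PySem.Dict.counter cards).keys (fun x => x) false).getD (i + 1) 0
          · rw [if_neg (not_not_intro (hlb.mpr hloop))]
            show true = (mx - mn == ((PySem.Dict.counter cards).size : Int) - 1)
            rw [hmx', hmn', hsize, ← hL]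
            symm
            rw [beq_iff_eq]
            exact hspread.mp hloop
          · rw [if_pos (fun hh => hloop (hlb.mp hh))]
            show false = (mx - mn == ((PySem.Dict.counter cards).size : Int) - 1)
            rw [hmx', hmn', hsize, ← hL]
            symm
            rw [beq_eq_false_iff_ne]
            exact fun h => hloop (hspread.mpr h)
    · have hA : ¬ ((PySem.Dict.counter cards).keys.all
          (fun card => (PySem.Dict.counter cards).getD card 0 == 2)) = true := by
        rw [List.all_eq_true]
        intro H
        exact hc (fun k hk => beq_iff_eq.mp (H k hk))
      have hB : ((PySem.Dict.counter cards).values.any (fun c => c ≠ 2)) = true := by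
        rw [List.any_eq_true]
        push Not at hc
        obtain ⟨k, hk, hv⟩ := hc
        refine ⟨(PySem.Dict.counter cards).getD k 0, ?_, decide_eq_true hv⟩
        rw [PySem.Dict.values_eq_map_keys _ hnd 0, List.mem_map]
        exact ⟨k, hk, rfl⟩
      rw [if_pos hA]
      rw [if_pos hB]
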